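-- pv_equiv track=rewrite | github.com/pypi-data/pypi-mirror-189 | packages/csw93/csw93-0.6.0-py3-none-any.whl/csw93/main.py | word2num
-- ===== SOURCE A (Python) =====
-- def word2num(w: str) -> int:
--     """Give the generator corresponding to the given column number.
--     The generator does not contain the letter representing the added factor itself,
--     but only the letters representing the basic factors forming the interaction.
--
--     Parameters
--     ----------
--     w : str
--         Generator
--
--     Returns
--     -------
--     num : int
--         Column number
--
--     Raises
--     ------
--     ValueError
--         Generator must only contain lowercase letters from a to z
--
--     Examples
--     --------
--     Which column number is equivalent to the generator 'abc' ?
--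
--     >>> word2num('abc')
--     7
--
--     """
--     if any([(ord(i) < 97 or ord(i) > 122) for i in w]):
--         raise ValueError("Generator must only contain lowercase letters")
--     letter_numbers = [ord(i) - 97 for i in w]
--     bin_num = ["0"] * (max(letter_numbers) + 1)
--     for i in letter_numbers:
--         bin_num[i] = "1"
--     num = int("".join(bin_num[::-1]), 2)
--     return num
-- ===== SOURCE B (Python) =====
-- def word2num(w: str) -> int:
--     if any(ord(c) < 97 or ord(c) > 122 for c in w):
--         raise ValueError("Generator must only contain lowercase letters")
--     num = 0
--     for c in w:
--         num |= 1 << (ord(c) - 97)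
--     return num
-- ===== Notes on version B (the rewrite author's own statement) =====
-- stated objective: idiomatic
-- what changed: B replaces A's build-a-binary-string pipeline (max, a list of '0'/'1' cells, reversal, int(...,2)) with a single pass that ORs 1 << (ord(c)-97) into an integer bitmask.
import Mathlib
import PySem

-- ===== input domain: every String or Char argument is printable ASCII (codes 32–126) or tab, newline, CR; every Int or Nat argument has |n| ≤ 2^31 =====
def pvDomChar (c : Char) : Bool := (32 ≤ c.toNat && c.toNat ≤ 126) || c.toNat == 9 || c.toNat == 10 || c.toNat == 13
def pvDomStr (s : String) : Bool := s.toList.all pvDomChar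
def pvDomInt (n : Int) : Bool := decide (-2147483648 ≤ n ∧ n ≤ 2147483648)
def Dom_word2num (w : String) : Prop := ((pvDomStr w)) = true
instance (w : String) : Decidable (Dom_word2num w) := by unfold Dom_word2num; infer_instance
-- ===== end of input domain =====

-- B replaces A's binary-string construction (max, list of "0"/"1" cells, reversal, int(...,2))
-- with a single pass ORing 1 << (ord(c) - 97) into an integer bitmask; same validation, same values.

-- ===== PORT A =====
def word2num (w : String) : Int :=
  if (w.toList.map (fun c => decide (c.toNat < 97) || decide (122 < c.toNat))).any (fun b => b) then
    0  -- Python raises ValueError here; excluded by Pre_word2num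
  else
    let letterNumbers : List Int := w.toList.map (fun c => (c.toNat : Int) - 97)
    -- max(letter_numbers): Python raises on the empty list (excluded by Pre_word2num); first maximal element
    let mx : Int := (PySem.List.max? letterNumbers (fun x => x)).getD 0
    let binNum : List String := List.replicate (mx + 1).toNat "0"
    -- for i in letter_numbers: bin_num[i] = "1"   (i ≥ 0 after validation, so .toNat is exact)
    let binNum := letterNumbers.foldl (fun bs i => bs.set i.toNat "1") binNum
    -- int("".join(bin_num[::-1]), 2), ported by hand as the base-2 digit fold:
    -- exact for the nonempty strings of '0'/'1' digits that this join produces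
    (binNum.reverse).foldl (fun acc s => acc * 2 + (if s = "1" then 1 else 0)) 0

-- ===== PORT B =====
def word2num_alt (w : String) : Int :=
  if w.toList.any (fun c => decide (c.toNat < 97) || decide (122 < c.toNat)) then
    0  -- Python raises ValueError here; excluded by Pre_word2num
  else
    -- num |= 1 << (ord(c) - 97)  (ord(c) ≥ 97 after validation, so the Nat subtraction is exact)
    w.toList.foldl (fun num c => PySem.Int.bor num ((1 : Int) <<< ((c.toNat - 97 : Nat)))) 0

-- ===== PRECONDITION & SPEC =====
-- Pre_ excludes exactly the inputs on which Python A raises ValueError: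
-- the empty string (max of an empty sequence) and strings with a character outside 'a'..'z'.
def Pre_word2num (w : String) : Prop :=
  w.toList ≠ [] ∧ w.toList.all (fun c => 97 ≤ c.toNat && c.toNat ≤ 122) = true
instance (w : String) : Decidable (Pre_word2num w) := by unfold Pre_word2num; infer_instance
def pvWitness_word2num : String := "abc"

def Spec_word2num (w : String) (out : Int) : Prop := out = word2num_alt w
instance (w : String) (out : Int) : Decidable (Spec_word2num w out) := by unfold Spec_word2num; infer_instance

-- ===== CLAIM (what is proved, stated in full; the proofs are below) =====
def Claim_equal_word2num : Prop := ∀ (w : String), Dom_word2num w → Pre_word2num w → Spec_word2num w (word2num w)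

-- ===== LEMMAS AND PROOFS =====

-- value of a little-endian list of "0"/"1" cells
def natVal : List String → Nat
  | [] => 0
  | s :: t => (if s = "1" then 1 else 0) + 2 * natVal t

theorem natVal_replicate (n : Nat) : natVal (List.replicate n "0") = 0 := by
  induction n with
  | zero => rfl
  | succ n ih => simp [List.replicate_succ, natVal, ih]

theorem testBit_natVal (bs : List String) (i : Nat) :
    (natVal bs).testBit i = decide (bs.getD i "0" = "1") := by
  induction bs generalizing i with
  | nil => simp [natVal, List.getD]
  | cons s t ih =>
    cases i with
    | zero =>
      rw [Nat.testBit_zero]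
      by_cases h : s = "1" <;> simp [natVal, h] <;> omega
    | succ i =>
      rw [Nat.testBit_succ]
      have : ((if s = "1" then 1 else 0) + 2 * natVal t) / 2 = natVal t := by
        by_cases h : s = "1" <;> simp [h] <;> omega
      simp only [natVal, this, ih]
      simp [List.getD]

theorem natVal_set (bs : List String) (i : Nat) (hi : i < bs.length) :
    natVal (bs.set i "1") = natVal bs ||| 2 ^ i := by
  apply Nat.eq_of_testBit_eq
  intro j
  rw [Nat.testBit_or, Nat.testBit_two_pow, testBit_natVal, testBit_natVal]
  simp only [List.getD, List.getElem?_set]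
  by_cases h : i = j
  · subst h; simp [hi]
  · simp [h]

theorem natVal_foldl_set (L : List Int) (bs : List String)
    (hL : ∀ i ∈ L, 0 ≤ i ∧ i.toNat < bs.length) :
    natVal (L.foldl (fun bs i => bs.set i.toNat "1") bs)
      = L.foldl (fun n i => n ||| 2 ^ i.toNat) (natVal bs) := by
  induction L generalizing bs with
  | nil => rfl
  | cons i t ih =>
    simp only [List.foldl_cons]
    rw [ih _ (by intro j hj; simpa [List.length_set] using hL j (List.mem_cons_of_mem _ hj)),
      natVal_set bs i.toNat (hL i (List.mem_cons_self)).2]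

theorem parse_eq_natVal (bs : List String) :
    (bs.reverse).foldl (fun acc s => acc * 2 + (if s = "1" then 1 else 0)) 0 = (natVal bs : Int) := by
  rw [List.foldl_reverse]
  induction bs with
  | nil => rfl
  | cons s t ih =>
    simp only [List.foldr_cons, ih, natVal]
    by_cases h : s = "1" <;> simp [h] <;> ring

theorem bor_foldl_cast (cs : List Char) (n : Nat) (hcs : ∀ c ∈ cs, 97 ≤ c.toNat) :
    cs.foldl (fun num c => PySem.Int.bor num ((1 : Int) <<< ((c.toNat - 97 : Nat)))) (n : Int)
      = ((cs.foldl (fun m c => m ||| 2 ^ (c.toNat - 97)) n : Nat) : Int) := by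
  induction cs generalizing n with
  | nil => rfl
  | cons c t ih =>
    simp only [List.foldl_cons]
    rw [show ((1 : Int) <<< ((c.toNat - 97 : Nat))) = ((2 ^ (c.toNat - 97) : Nat) : Int) by
        rw [Int.shiftLeft_eq]; push_cast; ring,
      PySem.Int.bor_natCast, ih _ (fun d hd => hcs d (List.mem_cons_of_mem _ hd))]

-- ===== VERDICT (by name: the statement is the Claim_ definition above) =====
theorem word2num_spec : Claim_equal_word2num := by
  intro w _ hpre
  obtain ⟨hne, hall⟩ := hpre
  have hrange : ∀ c ∈ w.toList, 97 ≤ c.toNat ∧ c.toNat ≤ 122 := by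
    intro c hc
    have := List.all_eq_true.mp hall c hc
    simpa using this
  unfold Spec_word2num word2num word2num_alt
  have hchk : ∀ c ∈ w.toList, (decide (c.toNat < 97) || decide (122 < c.toNat)) = false := by
    intro c hc
    have := hrange c hc
    simp; omega
  have hfalse : w.toList.any (fun c => decide (c.toNat < 97) || decide (122 < c.toNat)) = false := by
    rw [List.any_eq_false]; intro c hc; simpa using hchk c hc
  rw [if_neg (by simp only [List.any_map, Function.comp_def]; simp [hfalse]),
      if_neg (by simp [hfalse])]
  -- name the pieces of A
  set cs := w.toList with hcs
  set L : List Int := cs.map (fun c => (c.toNat : Int) - 97) with hLdef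
  -- max exists and bounds every element
  obtain ⟨m, hm⟩ : ∃ m, PySem.List.max? L (fun x => x) = some m := by
    cases hmx : PySem.List.max? L (fun x => x) with
    | none =>
      exfalso
      rw [PySem.List.max?_eq_none_iff] at hmx
      exact hne (by simpa [hLdef] using hmx)
    | some m => exact ⟨m, rfl⟩
  have hmax : ∀ y ∈ L, y ≤ m := PySem.List.max?_isMax hm
  simp only [hm, Option.getD_some]
  have hLbound : ∀ i ∈ L, 0 ≤ i ∧ i.toNat < (List.replicate (m + 1).toNat "0").length := by
    intro i hi
    obtain ⟨c, hc, rfl⟩ := List.mem_map.mp hi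
    have h97 := (hrange c hc).1
    have hle := hmax _ hi
    constructor
    · omega
    · simp only [List.length_replicate]; omega
  rw [parse_eq_natVal, natVal_foldl_set L _ hLbound, natVal_replicate]
  have hB := bor_foldl_cast cs 0 (fun c hc => (hrange c hc).1)
  rw [Nat.cast_zero] at hB
  rw [hB]
  congr 1
  rw [hLdef, List.foldl_map]
  apply PySem.List.foldl_congr_mem
  intro n c hc
  have h97 := (hrange c hc).1
  congr 2
  omega
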